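-- pv_equiv track=rewrite | github.com/pablogl2002/CURSO3 | SAR/pract2/SAR_p2_cuenta_palabras.py | bigram_symbol
-- ===== SOURCE A (Python) =====
-- def bigram_symbol(d:dict, word):
--     # igualamos el diccionario solucion al diccionario incial
--     res:dict = d
--
--     i = 0
--     # bucle que recorre los simbolos de la palabra
--     while i < len(word) - 1:
--         # cogemos el par de simbolos consecutivos
--         s1 = word[i]
--         s2 = word[i + 1]
--
--         aux = s1 + s2
--         # añadimos al diccionario solucion el par de simbolos con frecuencia 1, si ya estaba, su frecuencia se incrementa en 1
--         res[aux] = res.get(aux, 0) + 1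
--         # recorremos el siguiente par
--         i += 1
--     # devuelve el diccionario resultado
--     return res
-- ===== SOURCE B (Python) =====
-- def bigram_symbol(d: dict, word):
--     # bigram keys, one per adjacent pair of symbols
--     pairs = [a + b for a, b in zip(word, word[1:])]
--     # one update per DISTINCT bigram: its total count is added in a single step
--     for p in dict.fromkeys(pairs):
--         d[p] = d.get(p, 0) + pairs.count(p)
--     return d
-- ===== Notes on version B (the rewrite author's own statement) =====
-- stated objective: simpler
-- what changed: Replaces the index-driven while loop that increments a counter once per position by a zip-built bigram list, an ordered dedup (dict.fromkeys) and one d[p] = d.get(p,0) + pairs.count(p) update per distinct bigram.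
import Mathlib
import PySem

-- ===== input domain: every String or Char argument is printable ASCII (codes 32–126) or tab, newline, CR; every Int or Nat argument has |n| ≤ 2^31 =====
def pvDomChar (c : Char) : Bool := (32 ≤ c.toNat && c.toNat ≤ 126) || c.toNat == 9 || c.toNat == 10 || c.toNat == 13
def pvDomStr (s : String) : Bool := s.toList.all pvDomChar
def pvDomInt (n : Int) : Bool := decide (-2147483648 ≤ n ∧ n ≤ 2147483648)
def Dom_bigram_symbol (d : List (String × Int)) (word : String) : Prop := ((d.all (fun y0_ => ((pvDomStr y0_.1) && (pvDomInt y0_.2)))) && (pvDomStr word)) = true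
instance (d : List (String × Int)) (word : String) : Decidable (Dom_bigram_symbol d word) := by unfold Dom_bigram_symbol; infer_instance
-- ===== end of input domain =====

-- B replaces A's index-driven while loop by a zip-built bigram list, an ordered dedup and one
-- d[p] = d.get(p,0) + pairs.count(p) update per distinct bigram (objective: simpler).
-- Both A and B mutate the dict argument in place and return it; the equivalence proved here is about the returned value.

-- ===== PORT A =====
-- while i < len(word)-1 ported as a fold over range(0, len(word)-1); word[i] via pyGetD
-- (the index is always in range, so the default ' ' is never used and the port is exact).
def bigram_symbol (d : List (String × Int)) (word : String) : List (String × Int) :=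
  let cs := word.toList
  let res : PySem.Dict String Int := PySem.Dict.ofList d
  ((PySem.List.pyRange 0 ((cs.length : Int) - 1)).foldl
    (fun r i =>
      let s1 := PySem.List.pyGetD cs i ' '
      let s2 := PySem.List.pyGetD cs (i + 1) ' '
      let aux := String.mk [s1, s2]
      r.insert aux (r.getD aux 0 + 1)) res).items

-- ===== PORT B =====
-- pairs = [a+b for a,b in zip(word, word[1:])]; for p in dict.fromkeys(pairs): d[p] = d.get(p,0) + pairs.count(p)
def bigram_symbol_alt (d : List (String × Int)) (word : String) : List (String × Int) :=
  let cs := word.toList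
  let pairs := (cs.zip (PySem.List.slice cs (some 1) none)).map (fun p => String.mk [p.1, p.2])
  let res : PySem.Dict String Int := PySem.Dict.ofList d
  ((PySem.List.dedup pairs).foldl
    (fun r p => r.insert p (r.getD p 0 + (pairs.count p : Int))) res).items

-- ===== PRECONDITION & SPEC =====
def Spec_bigram_symbol (d : List (String × Int)) (word : String) (out : List (String × Int)) : Prop := out = bigram_symbol_alt d word
instance (d : List (String × Int)) (word : String) (out : List (String × Int)) : Decidable (Spec_bigram_symbol d word out) := by unfold Spec_bigram_symbol; infer_instance

-- ===== CLAIM (what is proved, stated in full; the proofs are below) =====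
def Claim_equal_bigram_symbol : Prop := ∀ (d : List (String × Int)) (word : String), Dom_bigram_symbol d word → Spec_bigram_symbol d word (bigram_symbol d word)

-- ===== LEMMAS AND PROOFS =====

-- Set.update absorbs an `add` on its list argument
lemma pv_update_add {α : Type} [BEq α] [LawfulBEq α] (s t : PySem.Set α) (x : α) :
    PySem.Set.update s (PySem.Set.add t x) = PySem.Set.add (PySem.Set.update s t) x := by
  by_cases hxm : x ∈ t
  · have hxu : x ∈ PySem.Set.update s t := (PySem.Set.mem_update s t x).mpr (Or.inr hxm)
    have h1 : PySem.Set.add t x = t := by simp [PySem.Set.add, hxm]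
    have h2 : PySem.Set.add (PySem.Set.update s t) x = PySem.Set.update s t := by
      simp [PySem.Set.add, hxu]
    rw [h1, h2]
  · have h1 : PySem.Set.add t x = t ++ [x] := by simp [PySem.Set.add, hxm]
    rw [h1]
    show List.foldl PySem.Set.add s (t ++ [x]) = _
    rw [List.foldl_append]
    rfl

lemma pv_update_update {α : Type} [BEq α] [LawfulBEq α] (xs : List α) (t s : PySem.Set α) :
    PySem.Set.update s (PySem.Set.update t xs) = PySem.Set.update (PySem.Set.update s t) xs := by
  induction xs generalizing t s with
  | nil => rfl
  | cons x xs ih =>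
      show PySem.Set.update s (PySem.Set.update (PySem.Set.add t x) xs)
          = PySem.Set.update (PySem.Set.update s t) (x :: xs)
      rw [ih]
      show PySem.Set.update (PySem.Set.update s (PySem.Set.add t x)) xs
          = PySem.Set.update (PySem.Set.add (PySem.Set.update s t) x) xs
      rw [pv_update_add]

-- updating with the deduplicated list is updating with the list
lemma pv_update_ofList {α : Type} [BEq α] [LawfulBEq α] (s : PySem.Set α) (xs : List α) :
    PySem.Set.update s (PySem.Set.ofList xs) = PySem.Set.update s xs := by
  have h := pv_update_update xs PySem.Set.empty s
  simpa [PySem.Set.ofList, PySem.Set.update] using h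

-- lookup after B's merge loop over distinct keys
lemma pv_getD_foldl_distinct (g : String → Int) :
    ∀ (l : List String), l.Nodup → ∀ (D : PySem.Dict String Int) (v : String),
      (l.foldl (fun r p => r.insert p (r.getD p 0 + g p)) D).getD v 0
        = if v ∈ l then D.getD v 0 + g v else D.getD v 0 := by
  intro l
  induction l with
  | nil => intro _ D v; simp
  | cons k l ih =>
      intro hnd D v
      have hk : k ∉ l := (List.nodup_cons.mp hnd).1
      have hl : l.Nodup := (List.nodup_cons.mp hnd).2
      simp only [List.foldl_cons]
      rw [ih hl]
      by_cases hv : v = k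
      · subst hv
        simp [hk, PySem.Dict.getD_insert_self]
      · rw [PySem.Dict.getD_insert_of_ne D _ _ hv]
        simp [List.mem_cons, hv]

-- A's index-generated bigram list is B's zip-generated one
lemma pv_pairs_eq (cs : List Char) :
    (PySem.List.pyRange 0 ((cs.length : Int) - 1)).map
        (fun i => String.mk [PySem.List.pyGetD cs i ' ', PySem.List.pyGetD cs (i + 1) ' '])
      = (cs.zip (cs.drop 1)).map (fun p => String.mk [p.1, p.2]) := by
  cases cs with
  | nil => rfl
  | cons a t =>
      have hlen : (((a :: t).length : Int) - 1) = ((t.length : Nat) : Int) := by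
        simp only [List.length_cons]; push_cast; ring
      rw [hlen, PySem.List.pyRange_zero_natCast, List.map_map]
      apply List.ext_getElem
      · simp
      · intro i h1 h2
        have hi : i < t.length := by simpa using h1
        have hi1 : i + 1 < (a :: t).length := by simp; omega
        have hia : i < (a :: t).length := by simp; omega
        simp only [List.getElem_map, Function.comp, List.getElem_range, List.getElem_zip]
        rw [PySem.List.pyGetD_natCast]
        have : ((i : Int) + 1) = ((i + 1 : Nat) : Int) := by push_cast; ring
        rw [this, PySem.List.pyGetD_natCast]
        have hg : (a :: t)[i]? = some (a :: t)[i] := List.getElem?_eq_getElem hia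
        simp [hg, hi]

-- ===== VERDICT (by name: the statement is the Claim_ definition above) =====
theorem bigram_symbol_spec : Claim_equal_bigram_symbol := by
  intro d word _
  unfold Spec_bigram_symbol bigram_symbol bigram_symbol_alt
  simp only []
  set cs := word.toList with hcs
  set D : PySem.Dict String Int := PySem.Dict.ofList d with hD
  rw [PySem.List.slice_from cs (by norm_num : (0:Int) ≤ 1)]
  set pairs := (cs.zip (cs.drop ((1:Int).toNat))).map (fun p => String.mk [p.1, p.2]) with hpairs
  -- rewrite A's fold as a fold over the bigram list
  have hA :
      (PySem.List.pyRange 0 ((cs.length : Int) - 1)).foldl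
        (fun r i =>
          let s1 := PySem.List.pyGetD cs i ' '
          let s2 := PySem.List.pyGetD cs (i + 1) ' '
          let aux := String.mk [s1, s2]
          r.insert aux (r.getD aux 0 + 1)) D
      = pairs.foldl (fun r a => r.insert a (r.getD a 0 + 1)) D := by
    rw [hpairs]
    have h1 : ((1:Int).toNat) = 1 := rfl
    rw [h1, ← pv_pairs_eq cs, List.foldl_map]
  rw [hA]
  -- both sides: items of dicts with equal (nodup) keys and equal lookups
  have hndD : D.keys.Nodup := PySem.Dict.nodup_keys_ofList d
  have hndA : ((pairs.foldl (fun r a => r.insert a (r.getD a 0 + 1)) D)).keys.Nodup :=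
    PySem.Dict.nodup_keys_foldl_insert pairs (fun r a => r.getD a 0 + 1) D hndD
  have hndB : (((PySem.List.dedup pairs).foldl
      (fun r p => r.insert p (r.getD p 0 + (pairs.count p : Int))) D)).keys.Nodup :=
    PySem.Dict.nodup_keys_foldl_insert _ (fun r p => r.getD p 0 + (pairs.count p : Int)) D hndD
  rw [PySem.Dict.items_eq_map_keys _ hndA 0, PySem.Dict.items_eq_map_keys _ hndB 0]
  have hkeys :
      ((pairs.foldl (fun r a => r.insert a (r.getD a 0 + 1)) D)).keys
      = (((PySem.List.dedup pairs).foldl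
          (fun r p => r.insert p (r.getD p 0 + (pairs.count p : Int))) D)).keys := by
    rw [PySem.Dict.keys_foldl_insert pairs (fun r a => r.getD a 0 + 1) D,
        PySem.Dict.keys_foldl_insert (PySem.List.dedup pairs)
          (fun r p => r.getD p 0 + (pairs.count p : Int)) D]
    rw [show PySem.List.dedup pairs = PySem.Set.ofList pairs from rfl, pv_update_ofList]
  rw [← hkeys]
  apply List.map_congr_left
  intro k _
  have hvalA :
      ((pairs.foldl (fun r a => r.insert a (r.getD a 0 + 1)) D)).getD k 0
        = D.getD k 0 + (pairs.count k : Int) :=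
    PySem.Dict.getD_foldl_insert_add_one pairs D k
  have hvalB :
      (((PySem.List.dedup pairs).foldl
          (fun r p => r.insert p (r.getD p 0 + (pairs.count p : Int))) D)).getD k 0
        = if k ∈ PySem.List.dedup pairs then D.getD k 0 + (pairs.count k : Int) else D.getD k 0 :=
    pv_getD_foldl_distinct (fun p => (pairs.count p : Int)) (PySem.List.dedup pairs)
      (PySem.Set.nodup_ofList pairs) D k
  rw [hvalA, hvalB]
  by_cases hk : k ∈ pairs
  · simp [PySem.List.dedup, PySem.Set.mem_ofList, hk]
  · simp [PySem.List.dedup, PySem.Set.mem_ofList, hk, List.count_eq_zero_of_not_mem hk]
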